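-- pv_equiv track=rewrite | github.com/git-cola/git-cola | cola/diffparse.py | _reverse_content_lines
-- ===== SOURCE A (Python) =====
-- DIFF_ADDITION = '+'
--
-- DIFF_DELETION = '-'
--
-- DIFF_NO_NEWLINE = '\\'
--
-- def _reverse_content_lines(content_lines):
--     # Normally in a diff, deletions come before additions.  In order to preserve
--     # this property in reverse patches, when this function encounters a deletion
--     # line and switches it to addition, it appends the line to the pending_additions
--     # list, while additions that get switched to deletions are appended directly to
--     # the content_lines list.  Each time a context line is encountered, any pending
--     # additions are then appended to the content_lines list immediately before the
--     # context line and the pending_additions list is cleared.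
--     new_content_lines = []
--     pending_additions = []
--     line_type = None
--     for line in content_lines:
--         prev_line_type = line_type
--         line_type = line[:1]
--         if line_type == DIFF_ADDITION:
--             new_content_lines.append(DIFF_DELETION + line[1:])
--         elif line_type == DIFF_DELETION:
--             pending_additions.append(DIFF_ADDITION + line[1:])
--         elif line_type == DIFF_NO_NEWLINE:
--             if prev_line_type == DIFF_DELETION:
--                 # Previous line was a deletion that was switched to an
--                 # addition, so the "No newline" line goes with it.
--                 pending_additions.append(line)
--             else:
--                 new_content_lines.append(line)
--         else:
--             new_content_lines.extend(pending_additions)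
--             new_content_lines.append(line)
--             pending_additions = []
--     new_content_lines.extend(pending_additions)
--     return new_content_lines
-- ===== SOURCE B (Python) =====
-- DIFF_ADDITION = '+'
--
-- DIFF_DELETION = '-'
--
-- DIFF_NO_NEWLINE = '\\'
--
--
-- def _convert_segment(seg):
--     # seg contains only '+', '-' and '\' lines.  Annotate each line with
--     # whether the previous line was a deletion, then split into the
--     # directly-emitted stream and the pending-additions stream.
--     prev_deleted = [False] + [ln[:1] == DIFF_DELETION for ln in seg[:-1]]
--     direct = [
--         DIFF_DELETION + ln[1:] if ln[:1] == DIFF_ADDITION else ln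
--         for ln, pd in zip(seg, prev_deleted)
--         if ln[:1] == DIFF_ADDITION or (ln[:1] == DIFF_NO_NEWLINE and not pd)
--     ]
--     pending = [
--         DIFF_ADDITION + ln[1:] if ln[:1] == DIFF_DELETION else ln
--         for ln, pd in zip(seg, prev_deleted)
--         if ln[:1] == DIFF_DELETION or (ln[:1] == DIFF_NO_NEWLINE and pd)
--     ]
--     return direct + pending
--
--
-- def _reverse_content_lines(content_lines):
--     # Split into maximal diff-line segments, each followed by its context
--     # line(s), convert each segment, and flatten.
--     segments = []
--     current = []
--     for line in content_lines:
--         if line[:1] in (DIFF_ADDITION, DIFF_DELETION, DIFF_NO_NEWLINE):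
--             current.append(line)
--         else:
--             segments.append((current, [line]))
--             current = []
--     segments.append((current, []))
--     return [out for seg, ctx in segments for out in _convert_segment(seg) + ctx]
-- ===== Notes on version B (the rewrite author's own statement) =====
-- stated objective: alternative
-- what changed: B replaces A's single stateful loop (output list + pending-additions accumulator flushed at each context line) by a two-phase decomposition: split the input into maximal diff segments with their context line, then convert each segment with two filtered passes over a prev-was-deletion annotation (direct stream ++ pending stream) and flatten.
import Mathlib
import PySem

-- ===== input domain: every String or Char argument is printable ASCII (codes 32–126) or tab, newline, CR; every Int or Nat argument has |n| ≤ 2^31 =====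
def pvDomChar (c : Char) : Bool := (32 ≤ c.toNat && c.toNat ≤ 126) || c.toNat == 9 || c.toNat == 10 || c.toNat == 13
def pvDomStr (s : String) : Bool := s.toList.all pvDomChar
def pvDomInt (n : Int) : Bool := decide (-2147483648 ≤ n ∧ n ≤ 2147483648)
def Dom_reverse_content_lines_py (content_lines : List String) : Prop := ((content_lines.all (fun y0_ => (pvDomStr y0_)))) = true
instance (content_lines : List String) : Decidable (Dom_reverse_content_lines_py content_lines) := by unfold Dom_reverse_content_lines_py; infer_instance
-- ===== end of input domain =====

-- B splits the input into context-separated segments and converts each with two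
-- filtered passes (direct stream, then pending stream) instead of A's single
-- stateful accumulator loop; objective: alternative decomposition, same cost.

-- line[:1] (first character as a string, "" for the empty string)
def pvT1 (l : String) : String := String.ofList (l.toList.take 1)
-- line[1:]
def pvD1 (l : String) : String := String.ofList (l.toList.drop 1)

-- ===== PORT A =====
def revA_loop : List String → List String → List String → Option String → List String
  | [], newL, pend, _ => newL ++ pend
  | line :: rest, newL, pend, prev =>
    let t := pvT1 line
    if t == "+" then
      revA_loop rest (newL ++ ["-" ++ pvD1 line]) pend (some t)
    else if t == "-" then
      revA_loop rest newL (pend ++ ["+" ++ pvD1 line]) (some t)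
    else if t == "\\" then
      if prev == some "-" then
        revA_loop rest newL (pend ++ [line]) (some t)
      else
        revA_loop rest (newL ++ [line]) pend (some t)
    else
      revA_loop rest (newL ++ pend ++ [line]) [] (some t)

def reverse_content_lines_py (content_lines : List String) : List String :=
  revA_loop content_lines [] [] none

-- ===== PORT B =====
def pvIsDiffLine (l : String) : Bool :=
  pvT1 l == "+" || pvT1 l == "-" || pvT1 l == "\\"

def pvConvertSegment (seg : List String) : List String :=
  let prevDeleted := false :: (seg.dropLast.map (fun ln => pvT1 ln == "-"))
  let pairs := seg.zip prevDeleted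
  let direct := pairs.filterMap (fun p =>
    if pvT1 p.1 == "+" then some ("-" ++ pvD1 p.1)
    else if pvT1 p.1 == "\\" && !p.2 then some p.1 else none)
  let pending := pairs.filterMap (fun p =>
    if pvT1 p.1 == "-" then some ("+" ++ pvD1 p.1)
    else if pvT1 p.1 == "\\" && p.2 then some p.1 else none)
  direct ++ pending

def reverse_content_lines_py_alt (content_lines : List String) : List String :=
  let st := content_lines.foldl
    (fun (st : List (List String × List String) × List String) line =>
      if pvIsDiffLine line then (st.1, st.2 ++ [line])
      else (st.1 ++ [(st.2, [line])], []))
    ([], [])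
  (st.1 ++ [(st.2, [])]).flatMap (fun (sc : List String × List String) => pvConvertSegment sc.1 ++ sc.2)

-- ===== PRECONDITION & SPEC =====
def Spec_reverse_content_lines_py (content_lines : List String) (out : List String) : Prop := out = reverse_content_lines_py_alt content_lines
instance (content_lines : List String) (out : List String) : Decidable (Spec_reverse_content_lines_py content_lines out) := by unfold Spec_reverse_content_lines_py; infer_instance

-- ===== CLAIM (what is proved, stated in full; the proofs are below) =====
def Claim_equal_reverse_content_lines_py : Prop := ∀ (content_lines : List String), Dom_reverse_content_lines_py content_lines → Spec_reverse_content_lines_py content_lines (reverse_content_lines_py content_lines)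

-- ===== LEMMAS AND PROOFS =====

-- "is the previous line a deletion" after processing a list, starting from b
def pvLastDel : List String → Bool → Bool
  | [], b => b
  | l :: r, _ => pvLastDel r (pvT1 l == "-")

-- the direct-output stream of a segment, given the incoming prev-deleted flag
def pvDirP : List String → Bool → List String
  | [], _ => []
  | l :: r, b =>
    (if pvT1 l == "+" then ["-" ++ pvD1 l]
     else if pvT1 l == "\\" && !b then [l] else []) ++ pvDirP r (pvT1 l == "-")

-- the pending-additions stream of a segment, given the incoming prev-deleted flag
def pvPenP : List String → Bool → List String
  | [], _ => []
  | l :: r, b =>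
    (if pvT1 l == "-" then ["+" ++ pvD1 l]
     else if pvT1 l == "\\" && b then [l] else []) ++ pvPenP r (pvT1 l == "-")

-- annotation of a segment with prev-deleted flags
def pvAnnot : List String → Bool → List (String × Bool)
  | [], _ => []
  | l :: r, b => (l, b) :: pvAnnot r (pvT1 l == "-")

-- A's loop without the output accumulator
def pvCore : List String → List String → Bool → List String
  | [], pend, _ => pend
  | l :: r, pend, b =>
    if pvT1 l == "+" then ("-" ++ pvD1 l) :: pvCore r pend (pvT1 l == "-")
    else if pvT1 l == "-" then pvCore r (pend ++ ["+" ++ pvD1 l]) (pvT1 l == "-")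
    else if pvT1 l == "\\" then
      (if b then pvCore r (pend ++ [l]) (pvT1 l == "-")
       else l :: pvCore r pend (pvT1 l == "-"))
    else pend ++ l :: pvCore r [] (pvT1 l == "-")

-- B's computation as a recursion on remaining input + current segment
def pvBcore : List String → List String → List String
  | [], cur => pvConvertSegment cur
  | l :: r, cur =>
    if pvIsDiffLine l then pvBcore r (cur ++ [l])
    else pvConvertSegment cur ++ [l] ++ pvBcore r []

theorem pvA_acc (xs : List String) : ∀ (newL pend : List String) (prev : Option String),
    revA_loop xs newL pend prev = newL ++ pvCore xs pend (prev == some "-") := by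
  induction xs with
  | nil => intro newL pend prev; simp [revA_loop, pvCore]
  | cons l r ih =>
    intro newL pend prev
    by_cases h1 : pvT1 l == "+"
    · have ht : pvT1 l = "+" := eq_of_beq h1
      simp [revA_loop, pvCore, ht, ih]
    · by_cases h2 : pvT1 l == "-"
      · have ht : pvT1 l = "-" := eq_of_beq h2
        simp [revA_loop, pvCore, ht, ih]
      · by_cases h3 : pvT1 l == "\\"
        · have ht : pvT1 l = "\\" := eq_of_beq h3
          by_cases hp : prev == some "-"
          · simp [revA_loop, pvCore, ht, hp, ih]
          · simp [revA_loop, pvCore, ht, hp, ih]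
        · simp [revA_loop, pvCore, h1, h2, h3, ih]

theorem pvLastDel_append (a b : List String) (b0 : Bool) :
    pvLastDel (a ++ b) b0 = pvLastDel b (pvLastDel a b0) := by
  induction a generalizing b0 with
  | nil => simp [pvLastDel]
  | cons l r ih => simp [pvLastDel, ih]

theorem pvDirP_append (a b : List String) (b0 : Bool) :
    pvDirP (a ++ b) b0 = pvDirP a b0 ++ pvDirP b (pvLastDel a b0) := by
  induction a generalizing b0 with
  | nil => simp [pvDirP, pvLastDel]
  | cons l r ih => simp [pvDirP, pvLastDel, ih]

theorem pvPenP_append (a b : List String) (b0 : Bool) :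
    pvPenP (a ++ b) b0 = pvPenP a b0 ++ pvPenP b (pvLastDel a b0) := by
  induction a generalizing b0 with
  | nil => simp [pvPenP, pvLastDel]
  | cons l r ih => simp [pvPenP, pvLastDel, ih]

theorem pvZip_annot (seg : List String) (b : Bool) :
    seg.zip (b :: seg.dropLast.map (fun ln => pvT1 ln == "-")) = pvAnnot seg b := by
  induction seg generalizing b with
  | nil => simp [pvAnnot]
  | cons l r ih =>
    cases r with
    | nil => simp [pvAnnot]
    | cons x xs =>
      simp only [List.dropLast_cons₂, List.map_cons, List.zip_cons_cons, pvAnnot]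
      exact congrArg _ (ih _)

theorem pvFilterMap_dir (seg : List String) (b : Bool) :
    (pvAnnot seg b).filterMap (fun p =>
      if pvT1 p.1 == "+" then some ("-" ++ pvD1 p.1)
      else if pvT1 p.1 == "\\" && !p.2 then some p.1 else none) = pvDirP seg b := by
  induction seg generalizing b with
  | nil => simp [pvAnnot, pvDirP]
  | cons l r ih =>
    simp only [pvAnnot, pvDirP, List.filterMap_cons]
    rw [ih]
    by_cases h1 : pvT1 l == "+"
    · simp [h1]
    · by_cases h3 : (pvT1 l == "\\" && !b) = true
      · simp [h1, h3]
      · simp [h1, h3]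

theorem pvFilterMap_pen (seg : List String) (b : Bool) :
    (pvAnnot seg b).filterMap (fun p =>
      if pvT1 p.1 == "-" then some ("+" ++ pvD1 p.1)
      else if pvT1 p.1 == "\\" && p.2 then some p.1 else none) = pvPenP seg b := by
  induction seg generalizing b with
  | nil => simp [pvAnnot, pvPenP]
  | cons l r ih =>
    simp only [pvAnnot, pvPenP, List.filterMap_cons]
    rw [ih]
    by_cases h1 : pvT1 l == "-"
    · simp [h1]
    · by_cases h3 : (pvT1 l == "\\" && b) = true
      · simp [h1, h3]
      · simp [h1, h3]

theorem pvConvertSegment_eq (seg : List String) :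
    pvConvertSegment seg = pvDirP seg false ++ pvPenP seg false := by
  unfold pvConvertSegment
  simp only [pvZip_annot, pvFilterMap_dir, pvFilterMap_pen]

theorem pvB_acc (xs : List String) :
    ∀ (segs : List (List String × List String)) (cur : List String),
    ((xs.foldl (fun (st : List (List String × List String) × List String) line =>
        if pvIsDiffLine line then (st.1, st.2 ++ [line])
        else (st.1 ++ [(st.2, [line])], [])) (segs, cur)).1
      ++ [((xs.foldl (fun (st : List (List String × List String) × List String) line =>
        if pvIsDiffLine line then (st.1, st.2 ++ [line])
        else (st.1 ++ [(st.2, [line])], [])) (segs, cur)).2, [])]).flatMap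
        (fun (sc : List String × List String) => pvConvertSegment sc.1 ++ sc.2)
      = segs.flatMap (fun (sc : List String × List String) => pvConvertSegment sc.1 ++ sc.2)
        ++ pvBcore xs cur := by
  induction xs with
  | nil => intro segs cur; simp [pvBcore]
  | cons l r ih =>
    intro segs cur
    rw [List.foldl_cons]
    by_cases h : pvIsDiffLine l
    · rw [if_pos h, ih]
      simp [pvBcore, h]
    · rw [if_neg h, ih]
      simp [pvBcore, h]

theorem pvMain (xs : List String) : ∀ (cur : List String),
    pvBcore xs cur = pvDirP cur false ++ pvCore xs (pvPenP cur false) (pvLastDel cur false) := by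
  induction xs with
  | nil => intro cur; simp [pvBcore, pvCore, pvConvertSegment_eq]
  | cons l r ih =>
    intro cur
    simp only [pvBcore, pvCore]
    by_cases h : pvIsDiffLine l
    · rw [if_pos h, ih]
      rw [pvDirP_append, pvPenP_append, pvLastDel_append]
      by_cases h1 : pvT1 l == "+"
      · have ht : pvT1 l = "+" := eq_of_beq h1
        simp [pvDirP, pvPenP, pvLastDel, ht]
      · by_cases h2 : pvT1 l == "-"
        · have ht : pvT1 l = "-" := eq_of_beq h2
          simp [pvDirP, pvPenP, pvLastDel, ht]
        · have h3 : pvT1 l == "\\" := by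
            unfold pvIsDiffLine at h; simp [h1, h2] at h; simp [h]
          have ht : pvT1 l = "\\" := eq_of_beq h3
          by_cases hb : pvLastDel cur false
          · simp [pvDirP, pvPenP, pvLastDel, ht, hb]
          · simp [pvDirP, pvPenP, pvLastDel, ht, hb]
    · rw [if_neg h, ih]
      have h' := h
      unfold pvIsDiffLine at h'
      simp at h'
      have h1 : (pvT1 l == "+") = false := by simp [h'.1.1]
      have h2 : (pvT1 l == "-") = false := by simp [h'.1.2]
      have h3 : (pvT1 l == "\\") = false := by simp [h'.2]
      simp [h1, h2, h3, pvConvertSegment_eq, pvDirP, pvPenP, pvLastDel]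

-- ===== VERDICT (by name: the statement is the Claim_ definition above) =====
theorem reverse_content_lines_py_spec : Claim_equal_reverse_content_lines_py := by
  intro content_lines _
  show reverse_content_lines_py content_lines = reverse_content_lines_py_alt content_lines
  unfold reverse_content_lines_py reverse_content_lines_py_alt
  rw [pvA_acc]
  have hb := pvB_acc content_lines [] []
  simp only [List.flatMap_nil, List.nil_append] at hb
  rw [hb, pvMain]
  simp [pvDirP, pvPenP, pvLastDel]
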